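-- pv_equiv track=rewrite | github.com/MonetDB/MonetDB | testing/sqltest.py | _get_row_count
-- ===== SOURCE A (Python) =====
-- def filter_junk(s: str):
--     """filters empty strings and comments
--     """
--     s = s.strip()
--     if s.startswith('--') or s.startswith('#') or s.startswith('stdout of test'):
--         return False
--     if s == '':
--         return False
--     return True
--
-- def _get_row_count(data):
--     count = 0
--     data = list(filter(filter_junk, data.splitlines()))
--     for l in data:
--         l = l.strip()
--         if l.startswith('[') and l.endswith(']'):
--             count+=1
--     return count
-- ===== SOURCE B (Python) =====
-- def _get_row_count(data):
--     # Character-level state machine in one pass over the raw string: tracks the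
--     # first and last non-blank character of the current line; no splitlines,
--     # no strip, no filtering stage.
--     count = 0
--     first = last = None
--     i = 0
--     n = len(data)
--     while i < n:
--         c = data[i]
--         if c == '\n' or c == '\r':
--             if first == '[' and last == ']':
--                 count += 1
--             first = last = None
--             if c == '\r' and i + 1 < n and data[i + 1] == '\n':
--                 i += 1
--         elif c != ' ' and c != '\t':
--             if first is None:
--                 first = c
--             last = c
--         i += 1
--     if first == '[' and last == ']':
--         count += 1
--     return count
-- ===== Notes on version B (the rewrite author's own statement) =====
-- stated objective: alternative
-- what changed: Replaced the splitlines/filter_junk/strip line pipeline with a single character-level state machine over the raw string that tracks the first and last non-blank character of the current line and counts a row at each line break; no intermediate line list or stripped strings are built, and the dead filter_junk stage disappears.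
import Mathlib
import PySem

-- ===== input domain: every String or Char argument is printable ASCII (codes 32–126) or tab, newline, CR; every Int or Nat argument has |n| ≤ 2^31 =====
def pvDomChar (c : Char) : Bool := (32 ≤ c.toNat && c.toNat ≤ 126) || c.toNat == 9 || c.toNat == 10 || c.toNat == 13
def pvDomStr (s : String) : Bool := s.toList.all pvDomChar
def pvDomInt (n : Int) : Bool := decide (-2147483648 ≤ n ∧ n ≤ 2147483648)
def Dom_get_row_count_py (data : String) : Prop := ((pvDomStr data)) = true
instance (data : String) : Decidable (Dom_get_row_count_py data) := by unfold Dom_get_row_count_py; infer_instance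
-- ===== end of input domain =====

-- B replaces the splitlines/filter_junk/strip pipeline by a one-pass character-level
-- state machine over the raw string (alternative decomposition, same O(n) cost).

-- ===== PORT A =====
def filter_junk (s : String) : Bool :=
  let s := PySem.Str.strip s
  if PySem.Str.startswith s "--" || PySem.Str.startswith s "#"
      || PySem.Str.startswith s "stdout of test" then false
  else if s = "" then false
  else true

def get_row_count_py (data : String) : Int :=
  ((PySem.Str.splitlines data).filter filter_junk).foldl
    (fun count l =>
      let l := PySem.Str.strip l
      if PySem.Str.startswith l "[" && PySem.Str.endswith l "]" then count + 1 else count)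
    0

-- ===== PORT B =====
-- transliteration of Source B's while loop: structural recursion over the characters,
-- carrying (first, last) = first/last non-blank character of the current line;
-- the '\r' :: '\n' :: _ pattern is Source B's one-character lookahead for "\r\n".
def pvMachine : List Char → Option Char → Option Char → Int → Int
  | [], first, last, count =>
      if first = some '[' ∧ last = some ']' then count + 1 else count
  | '\r' :: '\n' :: rest, first, last, count =>
      pvMachine rest none none (if first = some '[' ∧ last = some ']' then count + 1 else count)
  | c :: rest, first, last, count =>
      if c = '\n' ∨ c = '\r' then
        pvMachine rest none none (if first = some '[' ∧ last = some ']' then count + 1 else count)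
      else if c = ' ' ∨ c = '\t' then
        pvMachine rest first last count
      else
        pvMachine rest (if first = none then some c else first) (some c) count

def get_row_count_py_alt (data : String) : Int :=
  pvMachine data.toList none none 0

-- ===== PRECONDITION & SPEC =====
def Spec_get_row_count_py (data : String) (out : Int) : Prop := out = get_row_count_py_alt data
instance (data : String) (out : Int) : Decidable (Spec_get_row_count_py data out) := by unfold Spec_get_row_count_py; infer_instance

-- ===== CLAIM (what is proved, stated in full; the proofs are below) =====
def Claim_equal_get_row_count_py : Prop := ∀ (data : String), Dom_get_row_count_py data → Spec_get_row_count_py data (get_row_count_py data)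

-- ===== LEMMAS AND PROOFS =====

-- the line predicate of A, on strings and on char lists
def pvP (l : String) : Bool :=
  let s := PySem.Str.strip l
  PySem.Str.startswith s "[" && PySem.Str.endswith s "]"

def pvQ (l : List Char) : Bool :=
  PySem.Chars.startswith (PySem.Chars.strip l) ['['] &&
  PySem.Chars.endswith (PySem.Chars.strip l) [']']

-- the line-break predicate splitlines uses (definitionally the one in PySem.Chars.splitlines)
def pvIsB (c : Char) : Bool :=
  decide (c.toNat = 10) || decide (c.toNat = 13) || decide (c.toNat = 11) || decide (c.toNat = 12) ||
  decide (c.toNat = 28) || decide (c.toNat = 29) || decide (c.toNat = 30) || decide (c.toNat = 133) ||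
  decide (c.toNat = 8232) || decide (c.toNat = 8233)

def pvNS (xs : List Char) : List Char := xs.filter (fun c => !PySem.Chars.isspace c)

-- ---- A-side: the filter stage is dead and the fold counts pvP-lines ----

theorem pvP_junk (l : String) (h : pvP l = true) : filter_junk l = true := by
  unfold pvP at h
  unfold filter_junk
  simp only [Bool.and_eq_true, PySem.Str.startswith_eq, PySem.Str.endswith_eq] at h ⊢
  obtain ⟨h1, _⟩ := h
  rw [PySem.Chars.startswith_iff] at h1
  obtain ⟨t, ht⟩ := h1
  split
  · next hj =>
    exfalso
    simp only [Bool.or_eq_true, PySem.Chars.startswith_iff] at hj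
    rcases hj with (h2 | h2) | h2 <;>
      · obtain ⟨u, hu⟩ := h2
        rw [← hu] at ht
        simp at ht
  · split
    · next he =>
      exfalso
      rw [he] at ht
      simp at ht
    · rfl

theorem pvFoldlCount (xs : List String) (c : Int) :
    xs.foldl
      (fun count l =>
        let l := PySem.Str.strip l
        if PySem.Str.startswith l "[" && PySem.Str.endswith l "]" then count + 1 else count)
      c = c + (xs.countP pvP : Nat) := by
  induction xs generalizing c with
  | nil => simp
  | cons x xs ih =>
    simp only [List.foldl_cons, List.countP_cons, ih, pvP]
    split <;> push_cast <;> ring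

theorem pvA_eq_countP (data : String) :
    get_row_count_py data = ((PySem.Chars.splitlines data.toList).countP pvQ : Nat) := by
  unfold get_row_count_py
  rw [pvFoldlCount]
  have hfilter : ∀ xs : List String, (xs.filter filter_junk).countP pvP = xs.countP pvP := by
    intro xs
    induction xs with
    | nil => rfl
    | cons x xs ih =>
      by_cases hp : pvP x = true
      · have := pvP_junk x hp
        simp [this, hp, ih]
      · simp only [Bool.not_eq_true] at hp
        by_cases hj : filter_junk x = true <;> simp [hp, hj, ih]
  rw [hfilter]
  have hsl : PySem.Str.splitlines data =
      (PySem.Chars.splitlines data.toList).map String.ofList := rfl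
  rw [hsl, List.countP_map]
  have : (pvP ∘ String.ofList) = pvQ := by
    funext l
    simp [pvP, pvQ, Function.comp, PySem.Str.strip, PySem.Str.startswith,
      PySem.Str.endswith, String.toList_ofList]
  rw [this]
  simp

-- ---- generic facts about strip / head / last ----

theorem pvDropWhile_head? (p : Char → Bool) (ys : List Char) :
    (List.dropWhile p ys).head? = (ys.filter (fun c => !p c)).head? := by
  induction ys with
  | nil => rfl
  | cons y ys ih => by_cases h : p y <;> simp [h, ih]

theorem pvRstrip_cons (c : Char) (xs : List Char) :
    PySem.Chars.rstrip (c :: xs) =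
      if PySem.Chars.isspace c ∧ (PySem.Chars.rstrip xs).isEmpty then []
      else c :: PySem.Chars.rstrip xs := by
  unfold PySem.Chars.rstrip
  simp only [List.reverse_cons, List.dropWhile_append]
  by_cases h : (List.dropWhile PySem.Chars.isspace xs.reverse).isEmpty
  · by_cases hc : PySem.Chars.isspace c = true <;>
      simp [hc, List.dropWhile, List.isEmpty_iff.mp h]
  · simp [h]

theorem pvFilterDropWhile (p : Char → Bool) (xs : List Char) :
    (List.dropWhile p xs).filter (fun c => !p c) = xs.filter (fun c => !p c) := by
  induction xs with
  | nil => rfl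
  | cons y ys ih => by_cases h : p y <;> simp [h, ih]

theorem pvRstrip_getLast? (z : List Char) :
    (PySem.Chars.rstrip z).getLast? = (pvNS z).getLast? := by
  unfold PySem.Chars.rstrip pvNS
  rw [List.getLast?_reverse, pvDropWhile_head?]
  simp [List.filter_reverse, List.head?_reverse]

theorem pvStrip_head? (xs : List Char) :
    (PySem.Chars.strip xs).head? = (pvNS xs).head? := by
  induction xs with
  | nil => rfl
  | cons c xs ih =>
    by_cases hc : PySem.Chars.isspace c = true
    · have h1 : PySem.Chars.strip (c :: xs) = PySem.Chars.strip xs := by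
        unfold PySem.Chars.strip PySem.Chars.lstrip
        simp [hc]
      rw [h1, ih]
      simp [pvNS, hc]
    · have h1 : PySem.Chars.strip (c :: xs) = PySem.Chars.rstrip (c :: xs) := by
        unfold PySem.Chars.strip PySem.Chars.lstrip
        simp [hc]
      rw [h1, pvRstrip_cons, if_neg (by tauto)]
      simp [pvNS, hc]

theorem pvStrip_getLast? (xs : List Char) :
    (PySem.Chars.strip xs).getLast? = (pvNS xs).getLast? := by
  unfold PySem.Chars.strip
  rw [pvRstrip_getLast?]
  unfold pvNS PySem.Chars.lstrip
  rw [pvFilterDropWhile]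

theorem pvPrefix_singleton (a : Char) (s : List Char) :
    [a].isPrefixOf s = true ↔ s.head? = some a := by
  rw [List.isPrefixOf_iff_prefix]
  cases s with
  | nil => simp
  | cons b t =>
    simp only [List.head?_cons, Option.some.injEq]
    constructor
    · rintro ⟨r, hr⟩
      simp only [List.cons_append, List.nil_append, List.cons.injEq] at hr
      exact hr.1.symm
    · rintro rfl
      exact ⟨t, rfl⟩

theorem pvQ_reverse (cur : List Char) :
    pvQ cur.reverse = true ↔
      ((pvNS cur).getLast? = some '[' ∧ (pvNS cur).head? = some ']') := by
  have hS : ∀ (s p : List Char), PySem.Chars.startswith s p = p.isPrefixOf s := fun _ _ => rfl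
  have hE : ∀ (s p : List Char), PySem.Chars.endswith s p = p.reverse.isPrefixOf s.reverse :=
    fun _ _ => rfl
  unfold pvQ
  rw [Bool.and_eq_true, hS, hE]
  simp only [List.reverse_singleton]
  rw [pvPrefix_singleton, pvPrefix_singleton, List.head?_reverse,
    pvStrip_head?, pvStrip_getLast?]
  unfold pvNS
  simp only [List.filter_reverse, List.head?_reverse, List.getLast?_reverse]

-- ---- character classification on the domain ----

theorem pvCharEq (c d : Char) : c = d ↔ c.toNat = d.toNat := by
  constructor
  · rintro rfl; rfl
  · intro h; exact Char.ext (UInt32.toNat_inj.mp h)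

theorem pvC1 (c : Char) (hd : pvDomChar c = true) :
    pvIsB c = true ↔ (c = '\n' ∨ c = '\r') := by
  unfold pvDomChar at hd
  unfold pvIsB
  simp only [Bool.or_eq_true, Bool.and_eq_true, decide_eq_true_iff, beq_iff_eq] at hd ⊢
  rw [pvCharEq c '\n', pvCharEq c '\r']
  show _ ↔ c.toNat = 10 ∨ c.toNat = 13
  omega

theorem pvC2 (c : Char) (hd : pvDomChar c = true) (hb : pvIsB c = false) :
    PySem.Chars.isspace c = true ↔ (c = ' ' ∨ c = '\t') := by
  unfold pvDomChar at hd
  unfold pvIsB at hb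
  unfold PySem.Chars.isspace
  simp only [Bool.or_eq_true, Bool.and_eq_true, decide_eq_true_iff, beq_iff_eq,
    Bool.or_eq_false_iff, decide_eq_false_iff_not] at hd hb ⊢
  rw [pvCharEq c ' ', pvCharEq c '\t']
  show _ ↔ c.toNat = 32 ∨ c.toNat = 9
  omega

-- ---- splitlines.go: the accumulator splits off ----

theorem pvGo_acc (n : Nat) : ∀ (cs : List Char), cs.length ≤ n → ∀ cur acc,
    PySem.Chars.splitlines.go pvIsB cs cur acc =
      acc.reverse ++ PySem.Chars.splitlines.go pvIsB cs cur [] := by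
  induction n with
  | zero =>
    intro cs h cur acc
    have hnil : cs = [] := by cases cs with | nil => rfl | cons a b => simp at h
    subst hnil
    rw [PySem.Chars.splitlines.go.eq_1, PySem.Chars.splitlines.go.eq_1]
    by_cases hcur : cur.isEmpty = true <;> simp [hcur]
  | succ n ih =>
    intro cs h cur acc
    cases cs with
    | nil =>
      rw [PySem.Chars.splitlines.go.eq_1, PySem.Chars.splitlines.go.eq_1]
      by_cases hcur : cur.isEmpty = true <;> simp [hcur]
    | cons c rest =>
      have hlen : rest.length ≤ n := by simp at h; omega
      cases rest with
      | nil =>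
        have hside : ∀ (r : List Char), c = '\r' → ([] : List Char) = '\n' :: r → False := by
          intro r _ hcon; cases hcon
        rw [PySem.Chars.splitlines.go.eq_3 pvIsB cur acc c [] hside,
            PySem.Chars.splitlines.go.eq_3 pvIsB cur [] c [] hside]
        by_cases hb : pvIsB c = true
        · rw [if_pos hb, if_pos hb, ih [] (by simp) [] (cur.reverse :: acc),
              ih [] (by simp) [] [cur.reverse]]
          simp
        · rw [if_neg hb, if_neg hb, ih [] (by simp) (c :: cur) acc]
      | cons d rest' =>
        by_cases hcd : c = '\r' ∧ d = '\n'
        · obtain ⟨rfl, rfl⟩ := hcd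
          rw [PySem.Chars.splitlines.go.eq_2, PySem.Chars.splitlines.go.eq_2,
              ih rest' (by simp at h; omega) [] (cur.reverse :: acc),
              ih rest' (by simp at h; omega) [] [cur.reverse]]
          simp
        · have hside : ∀ (r : List Char), c = '\r' → d :: rest' = '\n' :: r → False := by
            rintro r rfl hcon
            exact hcd ⟨rfl, (List.cons.injEq _ _ _ _ ▸ hcon).1⟩
          rw [PySem.Chars.splitlines.go.eq_3 pvIsB cur acc c (d :: rest') hside,
              PySem.Chars.splitlines.go.eq_3 pvIsB cur [] c (d :: rest') hside]
          by_cases hb : pvIsB c = true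
          · rw [if_pos hb, if_pos hb, ih (d :: rest') hlen [] (cur.reverse :: acc),
                ih (d :: rest') hlen [] [cur.reverse]]
            simp
          · rw [if_neg hb, if_neg hb, ih (d :: rest') hlen (c :: cur) acc]

-- ---- the machine computes the count over splitlines.go ----

theorem pvBumpEq (cur : List Char) (k : Int) :
    (if (pvNS cur).getLast? = some '[' ∧ (pvNS cur).head? = some ']' then k + 1 else k)
      = k + (([cur.reverse].countP pvQ : Nat) : Int) := by
  by_cases h : pvQ cur.reverse = true
  · rw [if_pos ((pvQ_reverse cur).mp h)]
    simp [h]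
  · rw [if_neg (fun hh => h ((pvQ_reverse cur).mpr hh))]
    simp [h]

theorem pvMainNil (cur : List Char) (k : Int) :
    pvMachine [] ((pvNS cur).getLast?) ((pvNS cur).head?) k =
      k + ((PySem.Chars.splitlines.go pvIsB [] cur []).countP pvQ : Nat) := by
  rw [pvMachine.eq_1, PySem.Chars.splitlines.go.eq_1]
  by_cases hcur : cur.isEmpty = true
  · have : cur = [] := List.isEmpty_iff.mp hcur
    subst this
    simp [pvNS]
  · rw [if_neg hcur]
    simpa using pvBumpEq cur k

theorem pvMain (n : Nat) : ∀ (cs : List Char), cs.length ≤ n →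
    (∀ c ∈ cs, pvDomChar c = true) → ∀ (cur : List Char) (k : Int),
    pvMachine cs ((pvNS cur).getLast?) ((pvNS cur).head?) k =
      k + ((PySem.Chars.splitlines.go pvIsB cs cur []).countP pvQ : Nat) := by
  induction n with
  | zero =>
    intro cs h hdom cur k
    have hnil : cs = [] := by cases cs with | nil => rfl | cons a b => simp at h
    subst hnil
    exact pvMainNil cur k
  | succ n ih =>
    intro cs h hdom cur k
    cases cs with
    | nil => exact pvMainNil cur k
    | cons c rest =>
      have hdc : pvDomChar c = true := hdom c (by simp)
      have hdrest : ∀ x ∈ rest, pvDomChar x = true := fun x hx => hdom x (by simp [hx])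
      have hlen : rest.length ≤ n := by simp at h; omega
      by_cases hcrlf : ∃ r, c = '\r' ∧ rest = '\n' :: r
      · obtain ⟨r, rfl, rfl⟩ := hcrlf
        rw [pvMachine.eq_2, PySem.Chars.splitlines.go.eq_2,
            pvGo_acc r.length r le_rfl [] [cur.reverse], List.countP_append]
        have hr : r.length ≤ n := by simp at hlen; omega
        have hdr : ∀ x ∈ r, pvDomChar x = true := fun x hx => hdrest x (by simp [hx])
        have hmid := ih r hr hdr [] (if (pvNS cur).getLast? = some '[' ∧ (pvNS cur).head? = some ']' then k + 1 else k)
        simp only [show pvNS ([] : List Char) = [] from rfl,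
          List.getLast?_nil, List.head?_nil] at hmid
        rw [hmid]
        have hbump := pvBumpEq cur k
        push_cast at hbump ⊢
        simp only [List.reverse_cons, List.reverse_nil, List.nil_append]
        omega
      · have hside : ∀ (r : List Char), c = '\r' → rest = '\n' :: r → False :=
          fun r h1 h2 => hcrlf ⟨r, h1, h2⟩
        rw [pvMachine.eq_3 _ _ _ c rest hside,
            PySem.Chars.splitlines.go.eq_3 pvIsB cur [] c rest hside]
        by_cases hbr : c = '\n' ∨ c = '\r'
        · have hb : pvIsB c = true := (pvC1 c hdc).mpr hbr
          rw [if_pos hbr, if_pos hb,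
              pvGo_acc rest.length rest le_rfl [] [cur.reverse], List.countP_append]
          have hmid := ih rest hlen hdrest [] (if (pvNS cur).getLast? = some '[' ∧ (pvNS cur).head? = some ']' then k + 1 else k)
          simp only [show pvNS ([] : List Char) = [] from rfl,
            List.getLast?_nil, List.head?_nil] at hmid
          rw [hmid]
          have hbump := pvBumpEq cur k
          push_cast at hbump ⊢
          simp only [List.reverse_cons, List.reverse_nil, List.nil_append]
          omega
        · have hb : pvIsB c = false := by
            cases hbb : pvIsB c with
            | false => rfl
            | true => exact absurd ((pvC1 c hdc).mp hbb) hbr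
          have hgb : ¬ pvIsB c = true := by simp [hb]
          rw [if_neg hbr, if_neg hgb]
          by_cases hsp : c = ' ' ∨ c = '\t'
          · have hspc : PySem.Chars.isspace c = true := (pvC2 c hdc hb).mpr hsp
            rw [if_pos hsp]
            have hns : pvNS (c :: cur) = pvNS cur := by simp [pvNS, hspc]
            have := ih rest hlen hdrest (c :: cur) k
            rw [hns] at this
            exact this
          · have hspc : PySem.Chars.isspace c = false := by
              cases hss : PySem.Chars.isspace c with
              | false => rfl
              | true => exact absurd ((pvC2 c hdc hb).mp hss) hsp
            rw [if_neg hsp]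
            have hns : pvNS (c :: cur) = c :: pvNS cur := by simp [pvNS, hspc]
            have h1 : (if (pvNS cur).getLast? = none then some c else (pvNS cur).getLast?)
                = (pvNS (c :: cur)).getLast? := by
              rw [hns, List.getLast?_cons]
              cases hcase : (pvNS cur).getLast? <;> simp
            have h2 : some c = (pvNS (c :: cur)).head? := by rw [hns]; rfl
            rw [h1, h2]
            exact ih rest hlen hdrest (c :: cur) k

-- ===== VERDICT (by name: the statement is the Claim_ definition above) =====
theorem get_row_count_py_spec : Claim_equal_get_row_count_py := by
  intro data hdom
  unfold Spec_get_row_count_py get_row_count_py_alt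
  rw [pvA_eq_countP]
  have hd : ∀ c ∈ data.toList, pvDomChar c = true := by
    unfold Dom_get_row_count_py pvDomStr at hdom
    simpa [List.all_eq_true] using hdom
  have h := pvMain data.toList.length data.toList le_rfl hd [] 0
  simp only [pvNS, List.filter_nil, List.getLast?_nil, List.head?_nil] at h
  rw [show PySem.Chars.splitlines data.toList =
        PySem.Chars.splitlines.go pvIsB data.toList [] [] from rfl] at *
  omega
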